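-- pv_equiv track=rewrite | github.com/DiTEC-project/semantic-association-rule-learning | semantic_rule_learning/src/util/vector_util.py | get_category_boundaries
-- ===== SOURCE A (Python) =====
-- def get_category_boundaries(vector_category_tracker):
--     """
--     each input vector consists of one-hot encoded data for multiple categorical input
--     at the last step of the AE, a softmax will be applied to each category individually
--     therefore, this method returns the indices of input categories
--     """
--     indices = []
--     start = 0
--     for index in range(1, len(vector_category_tracker)):
--         if vector_category_tracker[start].split('_')[0] != vector_category_tracker[index].split('_')[0]:
--             indices.append({'start': start, 'end': index})
--             start = index
--
--     indices.append({'start': start, 'end': len(vector_category_tracker)})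
--
--     return indices
-- ===== SOURCE B (Python) =====
-- def get_category_boundaries(vector_category_tracker):
--     prefixes = [s.split('_')[0] for s in vector_category_tracker]
--
--     def blocks(seg, off):
--         # category blocks of the prefix segment seg, whose absolute offset is off
--         if len(seg) <= 1:
--             return [{'start': off, 'end': off + 1}] if seg else []
--         mid = len(seg) // 2
--         left = blocks(seg[:mid], off)
--         right = blocks(seg[mid:], off + mid)
--         if seg[mid - 1] == seg[mid]:
--             # same category on both sides of the cut: fuse the two adjacent blocks
--             fused = {'start': left[-1]['start'], 'end': right[0]['end']}
--             return left[:-1] + [fused] + right[1:]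
--         return left + right
--
--     return blocks(prefixes, 0)
-- ===== Notes on version B (the rewrite author's own statement) =====
-- stated objective: alternative
-- what changed: B maps every element to its prefix once and then computes the blocks by divide and conquer: it splits the list in half, recursively computes each half's blocks, and fuses the two blocks adjacent to the cut when the prefixes on both sides of it are equal, instead of A's left-to-right index scan with a group-start state variable that re-splits the group-start element at every index.
-- intended difference: On the empty input A returns [{'start': 0, 'end': 0}], a degenerate zero-width block produced by its unconditional final append, while B returns [], the intended answer since an empty vector has no categories. — e.g. on get_category_boundaries([]): A returns [[("start", 0), ("end", 0)]], B returns []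
import Mathlib
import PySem

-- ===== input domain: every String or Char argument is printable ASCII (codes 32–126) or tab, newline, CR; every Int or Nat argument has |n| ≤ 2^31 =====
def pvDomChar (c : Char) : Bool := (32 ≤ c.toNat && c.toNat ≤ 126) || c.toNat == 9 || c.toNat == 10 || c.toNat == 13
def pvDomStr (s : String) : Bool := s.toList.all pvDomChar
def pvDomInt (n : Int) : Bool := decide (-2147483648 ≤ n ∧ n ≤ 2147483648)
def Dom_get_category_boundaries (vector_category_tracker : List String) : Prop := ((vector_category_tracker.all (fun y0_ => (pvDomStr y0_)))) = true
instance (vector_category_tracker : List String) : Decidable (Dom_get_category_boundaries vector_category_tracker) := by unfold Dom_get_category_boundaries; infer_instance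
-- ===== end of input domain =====

-- B maps each element to its prefix once, then computes the blocks by divide and conquer
-- (split in half, recurse, fuse the two blocks adjacent to the cut when the prefixes on
-- both sides of it agree); on the empty input B returns [] where A returns a degenerate
-- zero-width block (see D_).

-- ===== PORT A =====
-- s.split('_')[0]; split? returns some because the separator "_" is nonempty
def pvPrefix (s : String) : String :=
  PySem.List.pyGetD ((PySem.Str.split? s "_").getD []) 0 ""

def get_category_boundaries (vector_category_tracker : List String) : List (List (String × Int)) :=
  let r := (PySem.List.pyRange 1 (vector_category_tracker.length : Int)).foldl
    (fun (st : List (List (String × Int)) × Int) index =>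
      if pvPrefix (PySem.List.pyGetD vector_category_tracker st.2 "") ≠
         pvPrefix (PySem.List.pyGetD vector_category_tracker index "")
      then (st.1 ++ [[("start", st.2), ("end", index)]], index)
      else st) ([], 0)
  r.1 ++ [[("start", r.2), ("end", (vector_category_tracker.length : Int))]]

-- ===== PORT B =====
-- block['start'] / block['end']: first-match association-list lookup (exact; keys present)
def pvLookup (d : List (String × Int)) (k : String) : Int := (List.lookup k d).getD 0

-- Source B's blocks(seg, off): divide and conquer over the prefix segment
def pvDCBlocks : List String → Int → List (List (String × Int))
  | [], _ => []
  | [_], off => [[("start", off), ("end", off + 1)]]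
  | p :: q :: t, off =>
      let seg := p :: q :: t
      let mid : Nat := seg.length / 2
      let left := pvDCBlocks (PySem.List.slice seg none (some (mid : Int))) off
      let right := pvDCBlocks (PySem.List.slice seg (some (mid : Int)) none) (off + (mid : Int))
      if PySem.List.pyGetD seg ((mid : Int) - 1) "" = PySem.List.pyGetD seg (mid : Int) "" then
        PySem.List.slice left none (some (-1)) ++
          [[("start", pvLookup (PySem.List.pyGetD left (-1) []) "start"),
            ("end", pvLookup (PySem.List.pyGetD right 0 []) "end")]] ++
          PySem.List.slice right (some 1) none
      else left ++ right
  termination_by seg _ => seg.length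
  decreasing_by
    · rw [PySem.List.slice_to_natCast]
      simp
      omega
    · rw [PySem.List.slice_from_natCast]
      simp
      omega

def get_category_boundaries_alt (vector_category_tracker : List String) : List (List (String × Int)) :=
  pvDCBlocks (vector_category_tracker.map pvPrefix) 0

-- ===== PRECONDITION & SPEC =====
-- On the empty input A returns [{'start': 0, 'end': 0}], a degenerate zero-width block produced
-- by its unconditional final append, while B returns [], the intended answer since an empty
-- vector has no categories.
def D_get_category_boundaries (vector_category_tracker : List String) : Prop :=
  vector_category_tracker = []
instance (vector_category_tracker : List String) : Decidable (D_get_category_boundaries vector_category_tracker) := by unfold D_get_category_boundaries; infer_instance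

def Spec_get_category_boundaries (vector_category_tracker : List String) (out : List (List (String × Int))) : Prop := ¬ D_get_category_boundaries vector_category_tracker → out = get_category_boundaries_alt vector_category_tracker
instance (vector_category_tracker : List String) (out : List (List (String × Int))) : Decidable (Spec_get_category_boundaries vector_category_tracker out) := by unfold Spec_get_category_boundaries; infer_instance

def pvDiffWitness_get_category_boundaries : List String := []
def pvDiffWitnessOut_get_category_boundaries : (List (List (String × Int))) × (List (List (String × Int))) :=
  ([[("start", 0), ("end", 0)]], [])

-- ===== CLAIM (what is proved, stated in full; the proofs are below) =====
def Claim_unchanged_get_category_boundaries : Prop := ∀ (vector_category_tracker : List String), Dom_get_category_boundaries vector_category_tracker → Spec_get_category_boundaries vector_category_tracker (get_category_boundaries vector_category_tracker)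
def Claim_changed_get_category_boundaries : Prop := Dom_get_category_boundaries (pvDiffWitness_get_category_boundaries) ∧ D_get_category_boundaries (pvDiffWitness_get_category_boundaries) ∧ get_category_boundaries (pvDiffWitness_get_category_boundaries) = pvDiffWitnessOut_get_category_boundaries.1 ∧ get_category_boundaries_alt (pvDiffWitness_get_category_boundaries) = pvDiffWitnessOut_get_category_boundaries.2 ∧ pvDiffWitnessOut_get_category_boundaries.1 ≠ pvDiffWitnessOut_get_category_boundaries.2
def Claim_exact_get_category_boundaries : Prop := ∀ (vector_category_tracker : List String), Dom_get_category_boundaries vector_category_tracker → D_get_category_boundaries vector_category_tracker → get_category_boundaries vector_category_tracker ≠ get_category_boundaries_alt vector_category_tracker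

-- ===== LEMMAS AND PROOFS =====

-- canonical run decomposition of a prefix list: the bridge between A's scan and B's d&c
def pvBlocks : List String → Int → List (List (String × Int))
  | [], _ => []
  | p :: t, start =>
      let run : Int := 1 + ((t.takeWhile (· == p)).length : Int)
      [("start", start), ("end", start + run)] :: pvBlocks (t.dropWhile (· == p)) (start + run)
  termination_by rest _ => rest.length
  decreasing_by
    simpa using Nat.lt_succ_of_le (List.length_dropWhile_le _ _)

lemma pvBlocks_nil (s : Int) : pvBlocks [] s = [] := by
  rw [pvBlocks]

lemma pvBlocks_cons (p : String) (t : List String) (s : Int) :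
    pvBlocks (p :: t) s =
      [("start", s), ("end", s + (1 + ((t.takeWhile (· == p)).length : Int)))] ::
        pvBlocks (t.dropWhile (· == p)) (s + (1 + ((t.takeWhile (· == p)).length : Int))) := by
  rw [pvBlocks]

-- A's loop, phrased over the prefix list P
def pvStepA (P : List String) (st : List (List (String × Int)) × Int) (i : Int) :
    List (List (String × Int)) × Int :=
  if PySem.List.pyGetD P st.2 "" ≠ PySem.List.pyGetD P i ""
  then (st.1 ++ [[("start", st.2), ("end", i)]], i) else st

def pvFoldA (P : List String) (k : Int) : List (List (String × Int)) × Int :=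
  (PySem.List.pyRange 1 k).foldl (pvStepA P) ([], 0)

lemma pvPrefix_pyGetD (v : List String) (i : Int) :
    pvPrefix (PySem.List.pyGetD v i "") = PySem.List.pyGetD (v.map pvPrefix) i "" := by
  have h := PySem.List.pyGetD_map pvPrefix v i ""
  rw [show pvPrefix "" = "" from rfl] at h
  exact h.symm

lemma pvA_eq (v : List String) :
    get_category_boundaries v =
      (pvFoldA (v.map pvPrefix) (v.length : Int)).1 ++
        [[("start", (pvFoldA (v.map pvPrefix) (v.length : Int)).2), ("end", (v.length : Int))]] := by
  unfold get_category_boundaries pvFoldA pvStepA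
  have hstep : (fun (st : List (List (String × Int)) × Int) index =>
      if pvPrefix (PySem.List.pyGetD v st.2 "") ≠ pvPrefix (PySem.List.pyGetD v index "")
      then (st.1 ++ [[("start", st.2), ("end", index)]], index) else st) =
      (fun (st : List (List (String × Int)) × Int) i =>
      if PySem.List.pyGetD (v.map pvPrefix) st.2 "" ≠ PySem.List.pyGetD (v.map pvPrefix) i ""
      then (st.1 ++ [[("start", st.2), ("end", i)]], i) else st) := by
    funext st i
    rw [pvPrefix_pyGetD, pvPrefix_pyGetD]
  rw [hstep]

lemma pvTakeWhile_append {q : String → Bool} (u w : List String)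
    (hu : ∀ x ∈ u, q x = true) :
    (u ++ w).takeWhile q = u ++ w.takeWhile q := by
  induction u with
  | nil => simp
  | cons a t ih =>
      simp only [List.cons_append, List.takeWhile_cons, hu a (by simp), if_true]
      rw [ih (fun x hx => hu x (by simp [hx]))]

lemma pvDropWhile_append {q : String → Bool} (u w : List String)
    (hu : ∀ x ∈ u, q x = true) :
    (u ++ w).dropWhile q = w.dropWhile q := by
  induction u with
  | nil => simp
  | cons a t ih =>
      simp only [List.cons_append, List.dropWhile_cons, hu a (by simp), if_true]
      exact ih (fun x hx => hu x (by simp [hx]))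

lemma pvDropWhile_head {q : String → Bool} :
    ∀ (t : List String) (c : String) (w' : List String), t.dropWhile q = c :: w' → q c = false := by
  intro t
  induction t with
  | nil => intro c w' h; simp at h
  | cons a t ih =>
      intro c w' h
      rw [List.dropWhile_cons] at h
      by_cases hq : q a = true
      · rw [if_pos hq] at h; exact ih c w' h
      · rw [if_neg hq] at h
        cases h
        simpa using hq

-- run-split: a block whose body is a run all equal to p, followed by w not starting with p
lemma pvBlocks_run (p : String) (u w : List String) (s : Int)
    (hu : ∀ x ∈ u, x = p) (hw : w.takeWhile (· == p) = []) :
    pvBlocks (p :: (u ++ w)) s =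
      [("start", s), ("end", s + 1 + (u.length : Int))] ::
        pvBlocks w (s + 1 + (u.length : Int)) := by
  have hq : ∀ x ∈ u, (x == p) = true := fun x hx => by simp [hu x hx]
  rw [pvBlocks]
  rw [pvTakeWhile_append u w hq, pvDropWhile_append u w hq, hw]
  have hdw : w.dropWhile (· == p) = w := by
    cases w with
    | nil => rfl
    | cons c t =>
        simp only [List.takeWhile_cons] at hw
        by_cases hcp : (c == p) = true
        · simp [hcp] at hw
        · simp [hcp]
  rw [hdw]
  simp [add_assoc]

-- splitting one run off a suffix of P: indices [s,k) all carry the same prefix and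
-- the rest does not start with it
lemma pvBlocks_drop (P : List String) (s k : Nat) (hsk : s < k) (hk : k ≤ P.length)
    (heq : ∀ j : Nat, s ≤ j → j < k → P.getD j "" = P.getD s "")
    (hw : (P.drop k).takeWhile (· == P.getD s "") = []) :
    pvBlocks (P.drop s) (s : Int) =
      [("start", (s : Int)), ("end", (k : Int))] :: pvBlocks (P.drop k) (k : Int) := by
  have hsn : s < P.length := by omega
  set u := (P.drop (s+1)).take (k - (s+1)) with hu_def
  have hulen : u.length = k - (s+1) := by
    simp [hu_def]
    omega
  have hP : P.drop s = P.getD s "" :: (u ++ P.drop k) := by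
    rw [List.getD_eq_getElem P "" hsn, List.drop_eq_getElem_cons hsn]
    congr 1
    rw [hu_def]
    conv_lhs => rw [← List.take_append_drop (k - (s+1)) (P.drop (s+1))]
    congr 1
    rw [List.drop_drop]
    congr 1
    omega
  have hu : ∀ x ∈ u, x = P.getD s "" := by
    intro x hx
    obtain ⟨i, hi, rfl⟩ := List.getElem_of_mem hx
    have hi' : i < k - (s+1) := by omega
    have h1 : u[i] = P[s + 1 + i]'(by omega) := by
      simp only [hu_def, List.getElem_take, List.getElem_drop]
    rw [h1, ← List.getD_eq_getElem P "" (by omega : s + 1 + i < P.length)]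
    exact heq (s + 1 + i) (by omega) (by omega)
  rw [hP, pvBlocks_run (P.getD s "") u (P.drop k) (s : Int) hu hw, hulen]
  have hcast : (s : Int) + 1 + ((k - (s+1) : Nat) : Int) = (k : Int) := by
    push_cast [Nat.cast_sub (by omega : s + 1 ≤ k)]
    ring
  rw [hcast]

-- the loop invariant for A, relating its state to the run decomposition
lemma pvInv (P : List String) : ∀ k : Nat, 1 ≤ k → k ≤ P.length →
    ∃ s : Nat, (pvFoldA P (k : Int)).2 = (s : Int) ∧ s < k ∧
      (∀ j : Nat, s ≤ j → j < k → P.getD j "" = P.getD s "") ∧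
      (pvFoldA P (k : Int)).1 ++ pvBlocks (P.drop s) (s : Int) = pvBlocks P 0 := by
  intro k hk
  induction k, hk using Nat.le_induction with
  | base =>
      intro _
      refine ⟨0, ?_, Nat.zero_lt_one, ?_, ?_⟩
      · simp [pvFoldA, PySem.List.pyRange_one_eq_nil (le_refl (1 : Int))]
      · intro j hj hj1
        have : j = 0 := by omega
        rw [this]
      · simp [pvFoldA, PySem.List.pyRange_one_eq_nil (le_refl (1 : Int))]
  | succ k hk ih =>
      intro hkn
      obtain ⟨s, hs, hsk, heq, hblocks⟩ := ih (by omega)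
      have hsplit : PySem.List.pyRange 1 ((k : Int) + 1) =
          PySem.List.pyRange 1 (k : Int) ++ [(k : Int)] :=
        PySem.List.pyRange_one_succ_right (by exact_mod_cast hk)
      have hA : pvFoldA P ((k + 1 : Nat) : Int) = pvStepA P (pvFoldA P (k : Int)) (k : Int) := by
        simp [pvFoldA, Nat.cast_add, Nat.cast_one, hsplit]
      have hsn : s < P.length := by omega
      have hkn' : k < P.length := by omega
      have hgs : PySem.List.pyGetD P ((s : Nat) : Int) "" = P.getD s "" :=
        PySem.List.pyGetD_natCast P s ""
      have hgk : PySem.List.pyGetD P ((k : Nat) : Int) "" = P.getD k "" :=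
        PySem.List.pyGetD_natCast P k ""
      by_cases hc : P.getD k "" = P.getD s ""
      · -- run continues: A's state unchanged
        refine ⟨s, ?_, by omega, ?_, ?_⟩
        · rw [hA]; unfold pvStepA
          rw [hs, if_neg (by rw [hgs, hgk]; exact not_ne_iff.mpr hc.symm)]
          exact hs
        · intro j hj hj1
          rcases Nat.lt_or_ge j k with h | h
          · exact heq j hj h
          · have : j = k := by omega
            rw [this]; exact hc
        · rw [hA]; unfold pvStepA
          rw [hs, if_neg (by rw [hgs, hgk]; exact not_ne_iff.mpr hc.symm)]
          exact hblocks
      · -- run ends at k: A appends the block, the decomposition splits the same run off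
        have hcond : PySem.List.pyGetD P (pvFoldA P (k : Int)).2 "" ≠
            PySem.List.pyGetD P ((k : Nat) : Int) "" := by
          rw [hs, hgs, hgk]
          exact fun h => hc h.symm
        have hw : (P.drop k).takeWhile (· == P.getD s "") = [] := by
          rw [List.drop_eq_getElem_cons hkn']
          simp only [List.takeWhile_cons]
          rw [if_neg]
          simp [← List.getD_eq_getElem P "" hkn']
          exact hc
        have hrun := pvBlocks_drop P s k hsk (by omega) heq hw
        refine ⟨k, ?_, by omega, ?_, ?_⟩
        · rw [hA]; unfold pvStepA
          rw [if_pos hcond]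
        · intro j hj hj1
          have : j = k := by omega
          rw [this]
        · rw [hA]; unfold pvStepA
          rw [if_pos hcond, hs]
          simp only
          rw [List.append_assoc, List.singleton_append, ← hrun]
          exact hblocks

-- the last element of a list ending in a run all equal to p is p
lemma pvGetLast_const (p : String) (t : List String) (hu : ∀ x ∈ t, (x == p) = true) :
    (p :: t).getLast?.getD "" = p := by
  have hne : p :: t ≠ [] := by simp
  rw [List.getLast?_eq_some_getLast hne]
  have hmem := List.getLast_mem hne
  rcases List.mem_cons.mp hmem with h | h
  · simpa using h
  · simpa using hu _ h

-- merging run decompositions across a cut whose two sides carry different prefixes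
lemma pvMerge_ne : ∀ (n : Nat) (L R : List String) (off : Int), L.length ≤ n → L ≠ [] → R ≠ [] →
    L.getLast?.getD "" ≠ R.head?.getD "" →
    pvBlocks (L ++ R) off = pvBlocks L off ++ pvBlocks R (off + (L.length : Int)) := by
  intro n
  induction n with
  | zero =>
      intro L R off hn hL _ _
      cases L with
      | nil => exact absurd rfl hL
      | cons a t => simp at hn
  | succ n ih =>
      intro L R off hn hL hR hne
      obtain ⟨p, t, rfl⟩ : ∃ p t, L = p :: t := by
        cases L with
        | nil => exact absurd rfl hL
        | cons a t => exact ⟨a, t, rfl⟩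
      obtain ⟨c, r, rfl⟩ : ∃ c r, R = c :: r := by
        cases R with
        | nil => exact absurd rfl hR
        | cons c r => exact ⟨c, r, rfl⟩
      have hu : ∀ x ∈ t.takeWhile (· == p), (x == p) = true := fun x hx => List.mem_takeWhile_imp (p := (· == p)) (l := t) hx
      have ht : t.takeWhile (· == p) ++ t.dropWhile (· == p) = t := List.takeWhile_append_dropWhile ..
      cases hwc : t.dropWhile (· == p) with
      | cons d w' =>
          have hc : (d == p) = false := pvDropWhile_head t d w' hwc
          have htw : (t ++ c :: r).takeWhile (· == p) = t.takeWhile (· == p) := by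
            conv_lhs => rw [← ht, hwc, List.append_assoc]
            rw [pvTakeWhile_append _ _ hu]
            simp [hc]
          have hdw : (t ++ c :: r).dropWhile (· == p) = (d :: w') ++ c :: r := by
            conv_lhs => rw [← ht, hwc, List.append_assoc]
            rw [pvDropWhile_append _ _ hu]
            simp [hc]
          have hLlast : (p :: t).getLast?.getD "" = (d :: w').getLast?.getD "" := by
            conv_lhs => rw [show p :: t = (p :: t.takeWhile (· == p)) ++ (d :: w') by
              rw [← hwc]; simp [ht]]
            rw [List.getLast?_append_of_ne_nil _ (by simp)]
          have hwlen : (d :: w').length ≤ n := by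
            have h1 := List.length_dropWhile_le (· == p) t
            rw [hwc] at h1
            simp at hn h1 ⊢
            omega
          have hIH := ih (d :: w') (c :: r)
            (off + (1 + ((t.takeWhile (· == p)).length : Int))) hwlen (by simp) (by simp)
            (by rw [← hLlast]; exact hne)
          have hlenN : (t.takeWhile (· == p)).length + (d :: w').length = t.length := by
            conv_rhs => rw [← ht, hwc]
            simp
          have hY : off + (1 + ((t.takeWhile (· == p)).length : Int)) + ((d :: w').length : Int)
              = off + (((p :: t).length : Nat) : Int) := by
            simp only [List.length_cons] at hlenN ⊢
            push_cast
            omega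
          conv_rhs => rw [pvBlocks_cons, hwc]
          rw [List.cons_append, pvBlocks_cons, htw, hdw, hIH, hY]
          simp
      | nil =>
          have ht' : t.takeWhile (· == p) = t := by
            rw [← ht, hwc]
            simp
            exact fun x hx => by simpa using hu x hx
          have hup : ∀ x ∈ t, (x == p) = true := by rw [ht'] at hu; exact hu
          have hLlast : (p :: t).getLast?.getD "" = p := pvGetLast_const p t hup
          rw [hLlast] at hne
          have hcp : (c == p) = false := by
            simp only [List.head?_cons, Option.getD_some] at hne
            simp [beq_eq_false_iff_ne]
            exact fun h => hne h.symm
          have htw : (t ++ c :: r).takeWhile (· == p) = t := by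
            rw [pvTakeWhile_append _ _ hup]
            simp [hcp]
          have hdw : (t ++ c :: r).dropWhile (· == p) = c :: r := by
            rw [pvDropWhile_append _ _ hup]
            simp [hcp]
          have hY : off + (1 + (t.length : Int))
              = off + (((p :: t).length : Nat) : Int) := by
            simp only [List.length_cons]
            push_cast
            ring
          conv_rhs => rw [pvBlocks_cons, hwc, ht', pvBlocks_nil]
          rw [List.cons_append, pvBlocks_cons, htw, hdw, hY]
          simp

-- merging across a cut whose two sides carry the same prefix: the adjacent blocks fuse
lemma pvMerge_eq : ∀ (n : Nat) (L R : List String) (off : Int), L.length ≤ n → L ≠ [] → R ≠ [] →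
    L.getLast?.getD "" = R.head?.getD "" →
    ∃ bs a r2 rest,
      pvBlocks L off = bs ++ [[("start", a), ("end", off + (L.length : Int))]] ∧
      pvBlocks R (off + (L.length : Int)) =
        [("start", off + (L.length : Int)), ("end", r2)] :: rest ∧
      pvBlocks (L ++ R) off = bs ++ [[("start", a), ("end", r2)]] ++ rest := by
  intro n
  induction n with
  | zero =>
      intro L R off hn hL _ _
      cases L with
      | nil => exact absurd rfl hL
      | cons a t => simp at hn
  | succ n ih =>
      intro L R off hn hL hR heq
      obtain ⟨p, t, rfl⟩ : ∃ p t, L = p :: t := by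
        cases L with
        | nil => exact absurd rfl hL
        | cons a t => exact ⟨a, t, rfl⟩
      obtain ⟨c, r, rfl⟩ : ∃ c r, R = c :: r := by
        cases R with
        | nil => exact absurd rfl hR
        | cons c r => exact ⟨c, r, rfl⟩
      have hu : ∀ x ∈ t.takeWhile (· == p), (x == p) = true := fun x hx => List.mem_takeWhile_imp (p := (· == p)) (l := t) hx
      have ht : t.takeWhile (· == p) ++ t.dropWhile (· == p) = t := List.takeWhile_append_dropWhile ..
      cases hwc : t.dropWhile (· == p) with
      | cons d w' =>
          have hc : (d == p) = false := pvDropWhile_head t d w' hwc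
          have htw : (t ++ c :: r).takeWhile (· == p) = t.takeWhile (· == p) := by
            conv_lhs => rw [← ht, hwc, List.append_assoc]
            rw [pvTakeWhile_append _ _ hu]
            simp [hc]
          have hdw : (t ++ c :: r).dropWhile (· == p) = (d :: w') ++ c :: r := by
            conv_lhs => rw [← ht, hwc, List.append_assoc]
            rw [pvDropWhile_append _ _ hu]
            simp [hc]
          have hLlast : (p :: t).getLast?.getD "" = (d :: w').getLast?.getD "" := by
            conv_lhs => rw [show p :: t = (p :: t.takeWhile (· == p)) ++ (d :: w') by
              rw [← hwc]; simp [ht]]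
            rw [List.getLast?_append_of_ne_nil _ (by simp)]
          have hwlen : (d :: w').length ≤ n := by
            have h1 := List.length_dropWhile_le (· == p) t
            rw [hwc] at h1
            simp at hn h1 ⊢
            omega
          obtain ⟨bs, a, r2, rest, h1, h2, h3⟩ := ih (d :: w') (c :: r)
            (off + (1 + ((t.takeWhile (· == p)).length : Int))) hwlen (by simp) (by simp)
            (by rw [← hLlast]; exact heq)
          have hlenN : (t.takeWhile (· == p)).length + (d :: w').length = t.length := by
            conv_rhs => rw [← ht, hwc]
            simp
          have hY : off + (1 + ((t.takeWhile (· == p)).length : Int)) + ((d :: w').length : Int)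
              = off + (((p :: t).length : Nat) : Int) := by
            simp only [List.length_cons] at hlenN ⊢
            push_cast
            omega
          rw [hY] at h1 h2
          refine ⟨[("start", off), ("end", off + (1 + ((t.takeWhile (· == p)).length : Int)))] :: bs,
            a, r2, rest, ?_, h2, ?_⟩
          · rw [pvBlocks_cons, hwc, h1]
            simp
          · rw [List.cons_append, pvBlocks_cons, htw, hdw, h3]
            simp
      | nil =>
          have ht' : t.takeWhile (· == p) = t := by
            rw [← ht, hwc]
            simp
            exact fun x hx => by simpa using hu x hx
          have hup : ∀ x ∈ t, (x == p) = true := by rw [ht'] at hu; exact hu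
          have hLlast : (p :: t).getLast?.getD "" = p := pvGetLast_const p t hup
          rw [hLlast] at heq
          simp only [List.head?_cons, Option.getD_some] at heq
          subst heq
          have htw : (t ++ p :: r).takeWhile (· == p) = t ++ p :: r.takeWhile (· == p) := by
            rw [pvTakeWhile_append _ _ hup]
            simp
          have hdw : (t ++ p :: r).dropWhile (· == p) = r.dropWhile (· == p) := by
            rw [pvDropWhile_append _ _ hup]
            simp
          refine ⟨[], off,
            off + (((p :: t).length : Nat) : Int) + (1 + ((r.takeWhile (· == p)).length : Int)),
            pvBlocks (r.dropWhile (· == p))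
              (off + (((p :: t).length : Nat) : Int) + (1 + ((r.takeWhile (· == p)).length : Int))),
            ?_, ?_, ?_⟩
          · rw [pvBlocks_cons, hwc, ht', pvBlocks_nil]
            have : off + (1 + (t.length : Int)) = off + (((p :: t).length : Nat) : Int) := by
              simp only [List.length_cons]
              push_cast
              ring
            rw [this]
            simp
          · rw [pvBlocks_cons]
          · rw [List.cons_append, pvBlocks_cons, htw, hdw]
            have hend : off + (1 + (((t ++ p :: r.takeWhile (· == p))).length : Int)) =
                off + (((p :: t).length : Nat) : Int) +
                  (1 + ((r.takeWhile (· == p)).length : Int)) := by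
              simp only [List.length_cons, List.length_append]
              push_cast
              ring
            rw [hend]
            simp

-- the divide-and-conquer computes the run decomposition
lemma pvDC_eq : ∀ (n : Nat) (seg : List String) (off : Int), seg.length ≤ n →
    pvDCBlocks seg off = pvBlocks seg off := by
  intro n
  induction n with
  | zero =>
      intro seg off h
      have hnil : seg = [] := by
        cases seg with
        | nil => rfl
        | cons a t => simp at h
      rw [hnil, pvDCBlocks, pvBlocks]
  | succ n ih =>
      intro seg off hlen
      match seg with
      | [] => rw [pvDCBlocks, pvBlocks]
      | [x] =>
          rw [pvDCBlocks, pvBlocks_cons]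
          simp [pvBlocks_nil]
      | p :: q :: t =>
          rw [pvDCBlocks]
          have hlen2 : 2 ≤ (p :: q :: t).length := by simp
          set seg := p :: q :: t with hseg
          set mid : Nat := seg.length / 2 with hmid
          have hmid1 : 1 ≤ mid := by
            rw [hmid]
            omega
          have hmidlt : mid < seg.length := by
            rw [hmid]
            omega
          have hslice1 : PySem.List.slice seg none (some (mid : Int)) = seg.take mid :=
            PySem.List.slice_to_natCast seg mid
          have hslice2 : PySem.List.slice seg (some (mid : Int)) none = seg.drop mid :=
            PySem.List.slice_from_natCast seg mid
          have hLlen : (seg.take mid).length = mid := by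
            simp
            omega
          have hLn : (seg.take mid).length ≤ n := by
            rw [hLlen]
            omega
          have hRn : (seg.drop mid).length ≤ n := by
            simp
            omega
          have hLne : seg.take mid ≠ [] := by
            intro h
            have := congrArg List.length h
            rw [hLlen] at this
            simp at this
            omega
          have hRne : seg.drop mid ≠ [] := by
            intro h
            have := congrArg List.length h
            simp at this
            omega
          have hg1 : PySem.List.pyGetD seg ((mid : Int) - 1) "" = seg.getD (mid - 1) "" := by
            rw [show ((mid : Int) - 1) = ((mid - 1 : Nat) : Int) by omega,
                PySem.List.pyGetD_natCast]
          have hg2 : PySem.List.pyGetD seg ((mid : Nat) : Int) "" = seg.getD mid "" :=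
            PySem.List.pyGetD_natCast seg mid ""
          have hlast : (seg.take mid).getLast?.getD "" = seg.getD (mid - 1) "" := by
            rw [List.getLast?_eq_getElem?, hLlen,
                List.getElem?_eq_getElem (by rw [hLlen]; omega : mid - 1 < (seg.take mid).length)]
            simp only [Option.getD_some, List.getElem_take]
            rw [List.getD_eq_getElem seg "" (by omega)]
          have hhead : (seg.drop mid).head?.getD "" = seg.getD mid "" := by
            rw [List.drop_eq_getElem_cons hmidlt]
            simp only [List.head?_cons, Option.getD_some]
            rw [List.getD_eq_getElem seg "" hmidlt]
          rw [hslice1, hslice2, hg1, hg2, ih (seg.take mid) off hLn,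
              ih (seg.drop mid) (off + (mid : Int)) hRn]
          by_cases hcond : seg.getD (mid - 1) "" = seg.getD mid ""
          · rw [if_pos hcond]
            obtain ⟨bs, a, r2, rest, h1, h2, h3⟩ :=
              pvMerge_eq n (seg.take mid) (seg.drop mid) off hLn hLne hRne
                (by rw [hlast, hhead]; exact hcond)
            rw [hLlen] at h1 h2
            rw [h1, h2]
            rw [PySem.List.pyGetD_neg_one_append_singleton, PySem.List.pyGetD_zero_cons]
            have hlk1 : pvLookup [("start", a), ("end", off + (mid : Int))] "start" = a := rfl
            have hlk2 : pvLookup [("start", off + (mid : Int)), ("end", r2)] "end" = r2 := rfl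
            rw [hlk1, hlk2]
            have hsl1 : PySem.List.slice (bs ++ [[("start", a), ("end", off + (mid : Int))]])
                none (some (-1)) = bs := by
              rw [show (-1 : Int) = -((1 : Nat) : Int) from rfl,
                  PySem.List.slice_to_neg_natCast _ 1 (by omega)]
              rw [show (bs ++ [[("start", a), ("end", off + (mid : Int))]]).length - 1
                  = bs.length by simp]
              exact List.take_left
            have hsl2 : PySem.List.slice ([("start", off + (mid : Int)), ("end", r2)] :: rest)
                (some 1) none = rest := by
              rw [show (1 : Int) = ((1 : Nat) : Int) from rfl,
                  PySem.List.slice_from_natCast]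
              rfl
            rw [hsl1, hsl2, ← h3, List.take_append_drop]
          · rw [if_neg hcond]
            have := pvMerge_ne n (seg.take mid) (seg.drop mid) off hLn hLne hRne
              (by rw [hlast, hhead]; exact hcond)
            rw [hLlen] at this
            rw [← this, List.take_append_drop]

-- ===== VERDICT =====
theorem get_category_boundaries_spec : Claim_unchanged_get_category_boundaries := by
  intro v _
  unfold Spec_get_category_boundaries D_get_category_boundaries
  intro hne
  have hlen : 1 ≤ v.length := by
    cases v with
    | nil => exact absurd rfl hne
    | cons a t => simp
  set P := v.map pvPrefix with hP
  have hlenP : P.length = v.length := by simp [hP]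
  obtain ⟨s, hs, hsk, heq, hblocks⟩ := pvInv P v.length hlen (by omega)
  have hw : (P.drop v.length).takeWhile (· == P.getD s "") = [] := by
    rw [List.drop_eq_nil_of_le (by omega)]
    rfl
  have hrun := pvBlocks_drop P s v.length hsk (by omega) heq hw
  rw [pvA_eq v, get_category_boundaries_alt, ← hP, pvDC_eq P.length P 0 (le_refl _),
      ← hblocks, hrun, hs]
  rw [List.drop_eq_nil_of_le (by omega : P.length ≤ v.length), pvBlocks_nil]
theorem get_category_boundaries_changed : Claim_changed_get_category_boundaries := by
  unfold Claim_changed_get_category_boundaries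
  refine ⟨by decide, rfl, by decide, ?_, by decide⟩
  show get_category_boundaries_alt [] = []
  rw [get_category_boundaries_alt]
  exact pvDC_eq 0 [] 0 (le_refl 0) ▸ pvBlocks_nil 0
theorem get_category_boundaries_tight : Claim_exact_get_category_boundaries := by
  intro v _ hD
  rw [hD, get_category_boundaries_alt]
  simp only [List.map_nil]
  rw [pvDC_eq 0 [] 0 (le_refl 0), pvBlocks_nil]
  decide
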